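-- pv_equiv track=rewrite | github.com/goodest-goodlab/murinae-seq | 03-Alignments/scripts/06_aln_filter.py | countUniqIdentSeqs
-- ===== SOURCE A (Python) =====
-- def countUniqIdentSeqs(codon_seqs):
-- # This function goes through every sequence in an alignment and counts how
-- # many sequences are unique or identical.
--
--     uniq_seqs, ident_seqs, found = 0, 0, [];
--     codon_seq_list = list(codon_seqs.values());
--     for seq in codon_seq_list:
--         if codon_seq_list.count(seq) == 1:
--             uniq_seqs += 1;
--         if codon_seq_list.count(seq) != 1 and seq not in found:
--             ident_seqs += 1;
--             found.append(seq);
--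
--     return uniq_seqs, ident_seqs;
-- ===== SOURCE B (Python) =====
-- def countUniqIdentSeqs(codon_seqs):
--     # One pass builds a frequency map; then classify each DISTINCT sequence once.
--     counts = {}
--     for seq in codon_seqs.values():
--         counts[seq] = counts.get(seq, 0) + 1
--     uniq_seqs, ident_seqs = 0, 0
--     for c in counts.values():
--         if c == 1:
--             uniq_seqs += 1
--         else:
--             ident_seqs += 1
--     return uniq_seqs, ident_seqs
-- ===== Notes on version B (the rewrite author's own statement) =====
-- stated objective: faster
-- what changed: Replaces the per-element list.count scans and the found list with a frequency dict built in one pass, then classifies each distinct sequence exactly once.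
import Mathlib
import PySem

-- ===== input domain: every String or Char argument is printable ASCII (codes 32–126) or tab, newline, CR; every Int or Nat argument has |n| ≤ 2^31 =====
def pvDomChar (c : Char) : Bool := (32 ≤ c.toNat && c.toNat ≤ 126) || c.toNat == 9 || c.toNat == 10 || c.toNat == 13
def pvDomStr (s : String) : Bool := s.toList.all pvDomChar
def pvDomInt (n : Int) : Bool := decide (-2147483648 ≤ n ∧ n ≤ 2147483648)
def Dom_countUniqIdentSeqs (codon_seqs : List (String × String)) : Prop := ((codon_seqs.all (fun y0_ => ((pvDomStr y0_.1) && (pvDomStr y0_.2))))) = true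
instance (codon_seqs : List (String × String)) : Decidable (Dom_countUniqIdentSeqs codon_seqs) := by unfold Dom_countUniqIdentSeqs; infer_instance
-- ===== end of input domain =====

-- B replaces A's per-element list.count scans and the `found` list with a frequency dict
-- built in one pass, classifying each distinct sequence exactly once (faster).

-- ===== PORT A =====
-- step of A's for-loop over codon_seq_list, state (uniq_seqs, ident_seqs, found)
def pvStepA (codon_seq_list : List String) (st : Int × Int × List String) (seq : String) :
    Int × Int × List String :=
  let u := if codon_seq_list.count seq = 1 then st.1 + 1 else st.1
  if codon_seq_list.count seq ≠ 1 ∧ seq ∉ st.2.2 then (u, st.2.1 + 1, st.2.2 ++ [seq])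
  else (u, st.2.1, st.2.2)

def countUniqIdentSeqs (codon_seqs : List (String × String)) : Int × Int :=
  let codon_seq_list := (PySem.Dict.ofList codon_seqs).values
  let r := codon_seq_list.foldl (pvStepA codon_seq_list) (0, 0, [])
  (r.1, r.2.1)

-- ===== PORT B =====
def countUniqIdentSeqs_alt (codon_seqs : List (String × String)) : Int × Int :=
  let vals := (PySem.Dict.ofList codon_seqs).values
  let counts := vals.foldl (fun d x => d.insert x (d.getD x 0 + 1)) (PySem.Dict.empty : PySem.Dict String Int)
  counts.values.foldl
    (fun (p : Int × Int) c => if c = 1 then (p.1 + 1, p.2) else (p.1, p.2 + 1)) (0, 0)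

-- ===== PRECONDITION & SPEC =====
def Spec_countUniqIdentSeqs (codon_seqs : List (String × String)) (out : Int × Int) : Prop := out = countUniqIdentSeqs_alt codon_seqs
instance (codon_seqs : List (String × String)) (out : Int × Int) : Decidable (Spec_countUniqIdentSeqs codon_seqs out) := by unfold Spec_countUniqIdentSeqs; infer_instance

-- ===== CLAIM (what is proved, stated in full; the proofs are below) =====
def Claim_equal_countUniqIdentSeqs : Prop := ∀ (codon_seqs : List (String × String)), Dom_countUniqIdentSeqs codon_seqs → Spec_countUniqIdentSeqs codon_seqs (countUniqIdentSeqs codon_seqs)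

-- ===== LEMMAS AND PROOFS =====

-- the membership test A's loop performs on `found`, as a Bool predicate
def pvCond (l fnd : List String) (s : String) : Bool :=
  decide (l.count s ≠ 1) && !(fnd.contains s)

theorem pvFilter_discard (t : List String) (s : String) (p : String → Bool) (hp : p s = false) :
    (PySem.Set.discard t s).filter p = t.filter p := by
  have hd : PySem.Set.discard t s = t.filter (fun y => !(y == s)) := by
    simp [PySem.Set.discard]
  rw [hd, List.filter_filter]
  refine List.filter_congr ?_
  intro y _
  by_cases hy : y = s
  · subst hy; simp [hp]
  · simp [hy]

theorem pvCond_append (l fnd : List String) (s y : String) :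
    pvCond l (fnd ++ [s]) y = (pvCond l fnd y && !(y == s)) := by
  simp [pvCond]
  by_cases h : y = s <;> simp [h]

theorem foldA_eq (l : List String) (m : List String) (u i : Int) (found : List String) :
    m.foldl (pvStepA l) (u, i, found) =
      (u + (m.countP (fun s => l.count s == 1) : Int),
       i + (((PySem.Set.ofList m).filter (pvCond l found)).length : Int),
       found ++ (PySem.Set.ofList m).filter (pvCond l found)) := by
  induction m generalizing u i found with
  | nil => simp
  | cons s m ih =>
    rw [List.foldl_cons, PySem.Set.ofList_cons]
    by_cases hc : l.count s = 1
    · have hstep : pvStepA l (u, i, found) s = (u + 1, i, found) := by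
        simp [pvStepA, hc]
      have hps : pvCond l found s = false := by simp [pvCond, hc]
      rw [hstep, ih, List.filter_cons_of_neg (by simp [hps]),
        pvFilter_discard _ _ _ hps, List.countP_cons_of_pos (p := fun s => l.count s == 1) (by simp [hc])]
      refine Prod.ext ?_ (Prod.ext rfl rfl)
      push_cast; ring
    · by_cases hf : s ∈ found
      · have hstep : pvStepA l (u, i, found) s = (u, i, found) := by
          simp [pvStepA, hc, hf]
        have hps : pvCond l found s = false := by simp [pvCond, hf]
        rw [hstep, ih, List.filter_cons_of_neg (by simp [hps]),
          pvFilter_discard _ _ _ hps, List.countP_cons_of_neg (p := fun s => l.count s == 1) (by simp [hc])]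
      · have hstep : pvStepA l (u, i, found) s = (u, i + 1, found ++ [s]) := by
          simp [pvStepA, hc, hf]
        have hps : pvCond l found s = true := by simp [pvCond, hc, hf]
        have hswap : (PySem.Set.ofList m).filter (pvCond l (found ++ [s]))
            = (PySem.Set.discard (PySem.Set.ofList m) s).filter (pvCond l found) := by
          have hd : PySem.Set.discard (PySem.Set.ofList m) s
              = (PySem.Set.ofList m).filter (fun y => !(y == s)) := by
            simp [PySem.Set.discard]
          rw [hd, List.filter_filter]
          refine List.filter_congr ?_
          intro y _
          rw [pvCond_append]
        rw [hstep, ih, hswap, List.filter_cons_of_pos (by simp [hps]),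
          List.countP_cons_of_neg (p := fun s => l.count s == 1) (by simp [hc])]
        refine Prod.ext rfl (Prod.ext ?_ ?_)
        · simp; ring
        · simp

theorem foldB_eq (l : List String) (ks : List String) (u i : Int) :
    (ks.map (fun k => (l.count k : Int))).foldl
        (fun (p : Int × Int) c => if c = 1 then (p.1 + 1, p.2) else (p.1, p.2 + 1)) (u, i)
      = (u + (ks.countP (fun s => l.count s == 1) : Int),
         i + (ks.countP (fun s => !(l.count s == 1)) : Int)) := by
  induction ks generalizing u i with
  | nil => simp
  | cons k ks ih =>
    simp only [List.map_cons, List.foldl_cons, List.countP_cons]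
    by_cases h : l.count k = 1
    · simp [h, ih]; ring_nf
    · have hz : ¬ ((l.count k : Int) = 1) := by exact_mod_cast h
      simp [h, hz, ih]; ring_nf

theorem countP_count_one (l : List String) :
    l.countP (fun s => l.count s == 1) = (PySem.Set.ofList l).countP (fun s => l.count s == 1) := by
  have h1 := List.sum_map_count_dedup_filter_eq_countP (fun s => l.count s == 1) l
  rw [← h1]
  have h2 : (l.dedup.filter (fun s => l.count s == 1)).map l.count
      = (l.dedup.filter (fun s => l.count s == 1)).map (fun _ => 1) := by
    refine List.map_congr_left ?_
    intro s hs
    have := (List.mem_filter.mp hs).2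
    simpa using this
  rw [h2]
  simp only [List.map_const', List.sum_replicate, smul_eq_mul, mul_one]
  have hperm : l.dedup.Perm (PySem.Set.ofList l) := by
    rw [List.perm_ext_iff_of_nodup l.nodup_dedup (PySem.Set.nodup_ofList l)]
    intro a; rw [List.mem_dedup, PySem.Set.mem_ofList]
  rw [List.countP_eq_length_filter]
  exact (hperm.filter _).length_eq

-- ===== VERDICT (by name: the statement is the Claim_ definition above) =====
theorem countUniqIdentSeqs_spec : Claim_equal_countUniqIdentSeqs := by
  intro codon_seqs _
  unfold Spec_countUniqIdentSeqs countUniqIdentSeqs countUniqIdentSeqs_alt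
  simp only []
  set v := (PySem.Dict.ofList codon_seqs).values with hv
  rw [PySem.Dict.foldl_insert_getD_add_one_eq_counter]
  have hvals : (PySem.Dict.counter v).values = (PySem.Set.ofList v).map (fun k => (v.count k : Int)) := by
    show (PySem.Dict.counter v).items.map Prod.snd = _
    rw [PySem.Dict.items_counter, List.map_map]
    rfl
  rw [hvals, foldB_eq v, foldA_eq v v 0 0 []]
  have hcond : ∀ s, pvCond v [] s = !(v.count s == 1) := by
    intro s
    by_cases h : v.count s = 1 <;> simp [pvCond, h]
  refine Prod.ext ?_ ?_
  · simpa using countP_count_one v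
  · simp only [List.countP_eq_length_filter]
    congr 2
    exact congrArg List.length (List.filter_congr (fun y _ => hcond y))
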